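-- pv_equiv track=rewrite | github.com/ahaspel/britannica-edition | tools/build_printed_pages.py | _build_ocr_runs
-- ===== SOURCE A (Python) =====
-- def _build_ocr_runs(pairs: list[tuple[int, int]]) -> list[list[tuple[int, int]]]:
--     """Group consecutive (leaf, printed) pairs with sequential printed
--     numbers into runs of length >= 2."""
--     runs = []
--     if not pairs:
--         return runs
--     cur = [pairs[0]]
--     for i in range(1, len(pairs)):
--         leaf, printed = pairs[i]
--         pl, pp = pairs[i - 1]
--         if printed == pp + (leaf - pl):
--             cur.append(pairs[i])
--         else:
--             if len(cur) >= 2: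
--                 runs.append(cur)
--             cur = [pairs[i]]
--     if len(cur) >= 2:
--         runs.append(cur)
--     return runs
-- ===== SOURCE B (Python) =====
-- def _build_ocr_runs(pairs: list[tuple[int, int]]) -> list[list[tuple[int, int]]]:
--     """Group consecutive (leaf, printed) pairs with sequential printed
--     numbers into runs of length >= 2.
--
--     Two-pointer index scan: for each start i, advance j to the end of the
--     maximal sequential run, slice pairs[i:j] out if long enough, jump i to j."""
--     runs = []
--     i, n = 0, len(pairs)
--     while i < n:
--         j = i + 1
--         while j < n and pairs[j][1] == pairs[j - 1][1] + (pairs[j][0] - pairs[j - 1][0]):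
--             j += 1
--         if j - i >= 2:
--             runs.append(pairs[i:j])
--         i = j
--     return runs
-- ===== Notes on version B (the rewrite author's own statement) =====
-- stated objective: alternative
-- what changed: Replaces A's element-by-element accumulator pass with a two-pointer index scan: an inner loop advances j to the end of each maximal sequential run, the run is sliced out as pairs[i:j] if j-i >= 2, and the outer loop jumps i to j.
import Mathlib
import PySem

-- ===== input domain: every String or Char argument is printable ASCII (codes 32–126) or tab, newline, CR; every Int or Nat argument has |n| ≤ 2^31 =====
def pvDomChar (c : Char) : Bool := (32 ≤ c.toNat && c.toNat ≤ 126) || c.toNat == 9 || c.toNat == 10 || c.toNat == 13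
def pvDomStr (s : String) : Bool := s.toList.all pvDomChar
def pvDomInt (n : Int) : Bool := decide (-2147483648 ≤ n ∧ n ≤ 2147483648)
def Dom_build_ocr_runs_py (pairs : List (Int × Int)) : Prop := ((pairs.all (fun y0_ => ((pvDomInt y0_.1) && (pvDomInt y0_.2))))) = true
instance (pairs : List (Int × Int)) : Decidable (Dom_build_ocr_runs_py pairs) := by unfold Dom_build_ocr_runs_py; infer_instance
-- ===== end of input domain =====

-- B replaces A's element-by-element accumulator pass with a two-pointer index
-- scan (inner loop finds the end of each maximal run, then slices it out);
-- alternative decomposition, same cost.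


-- ===== PORT A =====
-- A's for-loop over i in range(1, len(pairs)): structural recursion over the tail,
-- carrying prev = pairs[i-1], cur and runs exactly as in the Python.
def aLoop (prev : Int × Int) (cur : List (Int × Int)) (runs : List (List (Int × Int))) :
    List (Int × Int) → List (List (Int × Int))
  | [] => if 2 ≤ cur.length then runs ++ [cur] else runs
  | q :: rest =>
    if q.2 = prev.2 + (q.1 - prev.1) then
      aLoop q (cur ++ [q]) runs rest
    else
      aLoop q [q] (if 2 ≤ cur.length then runs ++ [cur] else runs) rest

def build_ocr_runs_py (pairs : List (Int × Int)) : List (List (Int × Int)) :=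
  match pairs with
  | [] => []
  | p :: rest => aLoop p [p] [] rest

-- ===== PORT B =====
-- B's inner while loop: starting from j = i+1 it advances j while the next pair
-- continues the run; here it counts how many elements of the tail continue the
-- run begun at prev (j - i - 1 in the Python).
def runLen (prev : Int × Int) : List (Int × Int) → Nat
  | [] => 0
  | q :: rest => if q.2 = prev.2 + (q.1 - prev.1) then runLen q rest + 1 else 0

-- B's outer while loop: each iteration handles one maximal run (pairs[i:j]),
-- appends its slice when j - i >= 2, and jumps i to j.
def build_ocr_runs_py_alt (pairs : List (Int × Int)) : List (List (Int × Int)) :=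
  match pairs with
  | [] => []
  | p :: rest =>
    let k := runLen p rest
    (if 2 ≤ (p :: rest.take k).length then [p :: rest.take k] else []) ++
      build_ocr_runs_py_alt (rest.drop k)
termination_by pairs.length
decreasing_by
  simp only [List.length_cons]
  have := List.length_drop (l := rest) (i := runLen p rest)
  omega

-- ===== PRECONDITION & SPEC =====
def Spec_build_ocr_runs_py (pairs : List (Int × Int)) (out : List (List (Int × Int))) : Prop := out = build_ocr_runs_py_alt pairs
instance (pairs : List (Int × Int)) (out : List (List (Int × Int))) : Decidable (Spec_build_ocr_runs_py pairs out) := by unfold Spec_build_ocr_runs_py; infer_instance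

-- ===== CLAIM (what is proved, stated in full; the proofs are below) =====
def Claim_equal_build_ocr_runs_py : Prop := ∀ (pairs : List (Int × Int)), Dom_build_ocr_runs_py pairs → Spec_build_ocr_runs_py pairs (build_ocr_runs_py pairs)

-- ===== LEMMAS AND PROOFS =====

theorem runLen_le (prev : Int × Int) : ∀ l : List (Int × Int), runLen prev l ≤ l.length := by
  intro l
  induction l generalizing prev with
  | nil => simp [runLen]
  | cons q rest ih =>
    simp only [runLen, List.length_cons]
    split
    · exact Nat.add_le_add_right (ih q) 1
    · omega

-- unfolding equations for B's well-founded recursion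
theorem alt_nil : build_ocr_runs_py_alt [] = [] := by
  unfold build_ocr_runs_py_alt
  rfl

theorem alt_cons (p : Int × Int) (rest : List (Int × Int)) :
    build_ocr_runs_py_alt (p :: rest) =
      (if 2 ≤ (p :: rest.take (runLen p rest)).length then [p :: rest.take (runLen p rest)]
       else []) ++ build_ocr_runs_py_alt (rest.drop (runLen p rest)) := by
  rw [build_ocr_runs_py_alt.eq_def]

-- A's loop state (cur ending at prev, runs so far) computes B's
-- take-maximal-run-then-recurse value of the remaining input.
theorem aLoop_eq :
    ∀ (rest : List (Int × Int)) (prev : Int × Int) (cur : List (Int × Int))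
      (runs : List (List (Int × Int))),
      aLoop prev cur runs rest =
        runs ++
          (if 2 ≤ cur.length + runLen prev rest then
              [cur ++ rest.take (runLen prev rest)] else []) ++
          build_ocr_runs_py_alt (rest.drop (runLen prev rest)) := by
  intro rest
  induction rest with
  | nil =>
    intro prev cur runs
    simp only [aLoop, runLen, List.take_nil, List.drop_nil, alt_nil, List.append_nil,
      Nat.add_zero]
    by_cases h : 2 ≤ cur.length <;> simp [h]
  | cons q rest ih =>
    intro prev cur runs
    by_cases h : q.2 = prev.2 + (q.1 - prev.1)
    · simp only [aLoop, if_pos h, runLen, List.take_succ_cons, List.drop_succ_cons]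
      rw [ih q (cur ++ [q]) runs]
      simp only [List.length_append, List.length_cons, List.length_nil]
      by_cases h2 : 2 ≤ cur.length + (runLen q rest + 1)
      · rw [if_pos h2, if_pos (show 2 ≤ cur.length + (0 + 1) + runLen q rest by omega)]
        simp [List.append_assoc]
      · rw [if_neg h2, if_neg (show ¬ 2 ≤ cur.length + (0 + 1) + runLen q rest by omega)]
    · simp only [aLoop, if_neg h, runLen, List.take_zero, List.drop_zero,
        List.append_nil, Nat.add_zero]
      rw [ih q [q] _, alt_cons]
      have hk : (rest.take (runLen q rest)).length = runLen q rest := by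
        simp [List.length_take, Nat.min_eq_left (runLen_le q rest)]
      simp only [List.length_cons, hk, List.singleton_append]
      by_cases hc : 2 ≤ cur.length <;> by_cases h2 : 2 ≤ 1 + runLen q rest <;>
        · have h2' : (2 ≤ runLen q rest + 1) ↔ (2 ≤ 1 + runLen q rest) := by omega
          simp [hc, h2, h2', List.append_assoc]

-- ===== VERDICT (by name: the statement is the Claim_ definition above) =====
theorem build_ocr_runs_py_spec : Claim_equal_build_ocr_runs_py := by
  intro pairs _
  unfold Spec_build_ocr_runs_py
  cases pairs with
  | nil => simp [build_ocr_runs_py, alt_nil]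
  | cons p rest =>
    rw [build_ocr_runs_py, aLoop_eq rest p [p] [], alt_cons]
    have hk : (rest.take (runLen p rest)).length = runLen p rest := by
      simp [List.length_take, Nat.min_eq_left (runLen_le p rest)]
    simp only [List.nil_append, List.singleton_append,
      List.length_cons, hk]
    by_cases h : 1 ≤ runLen p rest
    · simp [h, show 2 ≤ 1 + runLen p rest by omega]
    · simp [show runLen p rest = 0 by omega]
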